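-- pv_equiv track=rewrite | github.com/antoinesaget/bird_stance_classification | services/ml_backend/app/predictors/model_b_attributes.py | _invert_map
-- ===== SOURCE A (Python) =====
-- def _invert_map(mapping: dict[str, int], fallback: list[str]) -> list[str]:
--     if not mapping:
--         return fallback
--     size = max(int(v) for v in mapping.values()) + 1
--     out = [""] * size
--     for label, idx in mapping.items():
--         out[int(idx)] = str(label)
--     for i, value in enumerate(out):
--         if not value and i < len(fallback):
--             out[i] = fallback[i]
--     return out
-- ===== SOURCE B (Python) =====
-- def _invert_map(mapping: dict[str, int], fallback: list[str]) -> list[str]: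
--     if not mapping:
--         return fallback
--     size = max(int(v) for v in mapping.values()) + 1
--
--     def label_at(i):
--         lab = ""
--         for label, idx in mapping.items():
--             if int(idx) == i:
--                 lab = str(label)
--         return lab
--
--     return [label_at(i) or (fallback[i] if i < len(fallback) else "")
--             for i in range(size)]
-- ===== Notes on version B (the rewrite author's own statement) =====
-- stated objective: alternative
-- what changed: Replaces A's scatter-write-then-patch structure (preallocate [""]*size, mutate out[idx]=label for each pair, then walk the array substituting fallback entries) with a direct gather that builds the result in one comprehension: for each output position an inner linear scan of the mapping picks the last label with that index, falling back positionally; no mutable array, no scatter writes and no patch pass, at the cost of an inner scan (O(n*size)). …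
-- outside the precondition, e.g. on _invert_map({'b': 1, 'a': -1}, []): A returns ['', 'a'], B returns ['', 'b']; on _invert_map({'a': -2}, ['x']): A raises IndexError, B returns []
import Mathlib
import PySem

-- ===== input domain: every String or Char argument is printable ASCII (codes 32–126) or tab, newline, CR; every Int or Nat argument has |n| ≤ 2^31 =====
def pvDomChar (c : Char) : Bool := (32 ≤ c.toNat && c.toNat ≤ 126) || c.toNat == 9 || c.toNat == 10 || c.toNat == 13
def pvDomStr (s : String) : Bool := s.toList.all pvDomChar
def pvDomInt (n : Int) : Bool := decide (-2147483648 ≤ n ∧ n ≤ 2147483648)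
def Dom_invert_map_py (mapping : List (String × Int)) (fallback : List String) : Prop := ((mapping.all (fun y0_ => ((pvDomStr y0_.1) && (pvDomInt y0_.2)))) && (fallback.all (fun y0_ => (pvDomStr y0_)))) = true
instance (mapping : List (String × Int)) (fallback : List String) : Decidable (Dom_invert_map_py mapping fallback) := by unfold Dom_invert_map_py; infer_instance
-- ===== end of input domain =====

-- B replaces A's scatter-write-then-patch structure with a direct gather: for each output
-- position an inner linear scan of the mapping picks the last matching label (objective: alternative).

-- ===== PORT A =====
def invert_map_py (mapping : List (String × Int)) (fallback : List String) : List String :=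
  -- `if not mapping: return fallback` + `max(...)` on the values: max? is none exactly
  -- when the mapping is empty, which is the guarded return.
  match PySem.List.max? (mapping.map (fun p => p.2)) (fun v => v) with
  | none => fallback
  | some m =>
    let size : Int := m + 1
    let out0 : List String := List.replicate size.toNat ""
    let out1 : List String :=
      mapping.foldl (fun out p => PySem.List.pySetD out p.2 p.1) out0
    (PySem.List.enumerate out1 0).foldl
      (fun out iv =>
        if iv.2 = "" ∧ iv.1 < (fallback.length : Int)
        then PySem.List.pySetD out iv.1 (PySem.List.pyGetD fallback iv.1 "")
        else out) out1

-- ===== PORT B =====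
-- inner `label_at(i)`: linear scan keeping the last label whose index equals i
def pvLabelAt (mapping : List (String × Int)) (i : Int) : String :=
  mapping.foldl (fun lab p => if p.2 = i then p.1 else lab) ""

-- `fallback[i] if i < len(fallback) else ""`
def pvFallbackAt (fallback : List String) (i : Int) : String :=
  if i < (fallback.length : Int) then PySem.List.pyGetD fallback i "" else ""

def invert_map_py_alt (mapping : List (String × Int)) (fallback : List String) : List String :=
  -- `if not mapping: return fallback` + `max(...)`: the none branch is the guarded return.
  match PySem.List.max? (mapping.map (fun p => p.2)) (fun v => v) with
  | none => fallback
  | some m =>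
    (PySem.List.pyRange 0 (m + 1) 1).map (fun i =>
      let lab := pvLabelAt mapping i
      if lab = "" then pvFallbackAt fallback i else lab)  -- `label_at(i) or …`

-- ===== PRECONDITION & SPEC =====
-- Pre_ excludes mappings containing a negative index, outside the natural domain of a
-- label-to-index map: there A either raises IndexError or silently writes the label
-- through Python's negative-index wraparound, while B simply ignores such entries.
def Pre_invert_map_py (mapping : List (String × Int)) (fallback : List String) : Prop :=
  ∀ p ∈ mapping, 0 ≤ p.2
instance (mapping : List (String × Int)) (fallback : List String) : Decidable (Pre_invert_map_py mapping fallback) := by unfold Pre_invert_map_py; infer_instance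

def pvWitness_invert_map_py : (List (String × Int)) × List String :=
  ([("x", 0), ("y", 2)], ["a", "b", "c"])

def Spec_invert_map_py (mapping : List (String × Int)) (fallback : List String) (out : List String) : Prop := out = invert_map_py_alt mapping fallback
instance (mapping : List (String × Int)) (fallback : List String) (out : List String) : Decidable (Spec_invert_map_py mapping fallback out) := by unfold Spec_invert_map_py; infer_instance

-- ===== CLAIM (what is proved, stated in full; the proofs are below) =====
def Claim_equal_invert_map_py : Prop := ∀ (mapping : List (String × Int)) (fallback : List String), Dom_invert_map_py mapping fallback → Pre_invert_map_py mapping fallback → Spec_invert_map_py mapping fallback (invert_map_py mapping fallback)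

-- ===== LEMMAS AND PROOFS =====

theorem scatter_length (xs : List (String × Int)) (out : List String) :
    (xs.foldl (fun out p => PySem.List.pySetD out p.2 p.1) out).length = out.length := by
  induction xs generalizing out with
  | nil => rfl
  | cons x t ih => simp [List.foldl_cons, ih, PySem.List.length_pySetD]

-- the scatter loop read back at a fixed index is the last-wins scan B performs
theorem scatter_getD (xs : List (String × Int)) (out : List String) (i : Int) (hi : 0 ≤ i)
    (hxs : ∀ p ∈ xs, 0 ≤ p.2 ∧ p.2 < (out.length : Int)) :
    PySem.List.pyGetD (xs.foldl (fun out p => PySem.List.pySetD out p.2 p.1) out) i ""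
      = xs.foldl (fun acc p => if p.2 = i then p.1 else acc) (PySem.List.pyGetD out i "") := by
  induction xs generalizing out with
  | nil => rfl
  | cons x t ih =>
    have hx := hxs x (List.mem_cons_self ..)
    have hset : PySem.List.pySetD out x.2 x.1 = out.set x.2.toNat x.1 :=
      PySem.List.pySetD_of_nonneg _ _ hx.1
    have hlen : (out.set x.2.toNat x.1).length = out.length := by simp
    simp only [List.foldl_cons, hset]
    rw [ih _ (fun p hp => by rw [hlen]; exact hxs p (List.mem_cons_of_mem _ hp))]
    congr 1
    rw [PySem.List.pyGetD_of_nonneg _ _ hi, PySem.List.pyGetD_of_nonneg _ _ hi]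
    by_cases h : x.2 = i
    · have hlt : i.toNat < out.length := by omega
      have hnn : x.2.toNat = i.toNat := by omega
      rw [if_pos h, hnn, List.getD_eq_getElem?_getD, List.getElem?_set_self hlt]
      simp
    · have hne : x.2.toNat ≠ i.toNat := by omega
      rw [if_neg h, List.getD_eq_getElem?_getD, List.getD_eq_getElem?_getD,
        List.getElem?_set_ne hne]

-- the patch loop is a positional map
theorem patch_loop (fallback : List String) (tail : List String) : ∀ (done : List String),
    (PySem.List.enumerate tail (done.length : Int)).foldl
      (fun out iv =>
        if iv.2 = "" ∧ iv.1 < (fallback.length : Int)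
        then PySem.List.pySetD out iv.1 (PySem.List.pyGetD fallback iv.1 "")
        else out) (done ++ tail)
      = done ++ (PySem.List.enumerate tail (done.length : Int)).map
          (fun iv => if iv.2 = "" ∧ iv.1 < (fallback.length : Int)
                     then PySem.List.pyGetD fallback iv.1 "" else iv.2) := by
  induction tail with
  | nil => intro done; simp [PySem.List.enumerate_nil]
  | cons v rest ih =>
    intro done
    rw [PySem.List.enumerate_cons]
    simp only [List.foldl_cons, List.map_cons]
    set g : String := if v = "" ∧ (done.length : Int) < (fallback.length : Int)
        then PySem.List.pyGetD fallback (done.length : Int) "" else v with hg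
    have hstep : (if v = "" ∧ (done.length : Int) < (fallback.length : Int)
        then PySem.List.pySetD (done ++ v :: rest) (done.length : Int)
              (PySem.List.pyGetD fallback (done.length : Int) "")
        else done ++ v :: rest) = (done ++ [g]) ++ rest := by
      by_cases h : v = "" ∧ (done.length : Int) < (fallback.length : Int)
      · rw [if_pos h, hg, if_pos h, PySem.List.pySetD_natCast]
        rw [List.set_append_right _ _ (le_refl _)]
        simp
      · rw [if_neg h, hg, if_neg h]; simp
    rw [hstep]
    have hlen : ((done.length : Int) + 1) = (((done ++ [g]).length : Nat) : Int) := by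
      simp
    rw [hlen, ih (done ++ [g])]
    simp [hg]

-- ===== VERDICT (by name: the statement is the Claim_ definition above) =====
theorem invert_map_py_spec : Claim_equal_invert_map_py := by
  intro mapping fallback _hdom hpre
  unfold Spec_invert_map_py invert_map_py invert_map_py_alt
  cases hm : PySem.List.max? (mapping.map (fun p => p.2)) (fun v => v) with
  | none => rfl
  | some m =>
    dsimp only
    have hmax : ∀ y ∈ mapping.map (fun p => p.2), y ≤ m := by
      intro y hy; exact PySem.List.max?_isMax hm y hy
    set out0 : List String := List.replicate (m + 1).toNat "" with hout0
    set out1 : List String :=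
      mapping.foldl (fun out p => PySem.List.pySetD out p.2 p.1) out0 with hout1
    have hm0 : 0 ≤ m := by
      obtain ⟨p, hp, hpm⟩ := List.mem_map.mp (PySem.List.max?_mem hm)
      exact hpm ▸ hpre p hp
    have hlen1 : out1.length = (m + 1).toNat := by
      rw [hout1, scatter_length, hout0, List.length_replicate]
    have hlen1' : (out1.length : Int) = m + 1 := by omega
    -- the patch loop is a positional map, and enumerate is a gather over the range
    have hpatch := patch_loop fallback out1 []
    simp only [List.length_nil, Int.natCast_zero, List.nil_append] at hpatch
    rw [hpatch, PySem.List.enumerate_eq_map_pyRange (d := ""), List.map_map]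
    simp only [PySem.List.len_eq, hlen1']
    -- pointwise over the range
    refine List.map_congr_left ?_
    intro j hj
    have hj0 : 0 ≤ j := ((PySem.List.mem_pyRange_one).mp hj).1
    have hread : PySem.List.pyGetD out1 j "" = pvLabelAt mapping j := by
      rw [hout1, scatter_getD mapping out0 j hj0 (by
        intro p hp
        refine ⟨hpre p hp, ?_⟩
        have : p.2 ≤ m := hmax _ (List.mem_map.mpr ⟨p, hp, rfl⟩)
        rw [hout0, List.length_replicate]; omega)]
      have : PySem.List.pyGetD out0 j "" = "" := by
        rw [PySem.List.pyGetD_of_nonneg _ _ hj0, hout0, List.getD_eq_getElem?_getD]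
        cases h : (List.replicate (m + 1).toNat "")[j.toNat]? with
        | none => rfl
        | some v => simp [List.getElem?_replicate] at h; simp [h]
      rw [this]; rfl
    simp only [Function.comp, hread, pvFallbackAt]
    by_cases hv : pvLabelAt mapping j = ""
    · simp only [hv]
      split_ifs with h1 h2 h2 <;> simp_all
    · simp [hv]
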